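-- pv_equiv track=rewrite | github.com/yeevdev/ps | 프로그래머스/1/42862. 체육복/체육복.py | solution
-- ===== SOURCE A (Python) =====
-- def solution(n, lost, reserve):
--     s_lost = set(lost)
--     s_reserve = set(reserve)
--
--     # reserve에서 도난당한 사람 삭제
--     intersect = s_lost & s_reserve
--     s_reserve -= intersect
--     s_lost -= intersect
--
--     answer = n - len(s_lost)
--
--     for x in sorted(s_lost):
--         if x-1 in s_reserve:
--             s_reserve.remove(x-1)
--             answer += 1
--         elif x+1 in s_reserve:
--             s_reserve.remove(x+1)
--             answer += 1
--
--     return answer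
-- ===== SOURCE B (Python) =====
-- def solution(n, lost, reserve):
--     # Two-pointer merge over the two sorted difference lists instead of
--     # set membership tests with removal.
--     L = sorted(set(lost) - set(reserve))
--     R = sorted(set(reserve) - set(lost))
--     matched = 0
--     j = 0
--     for x in L:
--         while j < len(R) and R[j] < x - 1:
--             j += 1
--         if j < len(R) and R[j] <= x + 1:
--             matched += 1
--             j += 1
--     return n - len(L) + matched
-- ===== Notes on version B (the rewrite author's own statement) =====
-- stated objective: alternative
-- what changed: Replaces A's membership tests and removals on a reserve set by a two-pointer merge over the two sorted difference lists: a monotone index into sorted(reserve-lost) replaces the mutable set, so no element is ever searched or removed.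
import Mathlib
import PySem

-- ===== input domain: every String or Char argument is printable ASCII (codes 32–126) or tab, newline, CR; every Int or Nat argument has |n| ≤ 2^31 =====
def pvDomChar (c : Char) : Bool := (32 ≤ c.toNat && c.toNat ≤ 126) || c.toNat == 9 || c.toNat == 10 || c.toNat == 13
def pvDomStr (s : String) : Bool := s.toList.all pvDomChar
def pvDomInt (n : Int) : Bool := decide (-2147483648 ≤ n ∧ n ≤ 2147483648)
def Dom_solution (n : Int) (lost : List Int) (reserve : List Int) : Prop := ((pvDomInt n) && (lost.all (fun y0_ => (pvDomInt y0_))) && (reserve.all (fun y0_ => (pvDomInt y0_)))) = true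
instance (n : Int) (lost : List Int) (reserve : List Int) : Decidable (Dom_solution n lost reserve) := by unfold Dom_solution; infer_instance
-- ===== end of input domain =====

-- B replaces A's set-membership greedy (remove from a reserve set) by a two-pointer
-- merge over the two sorted difference lists; objective: alternative (same result, no removals).

-- ===== PORT A =====
-- A's loop body over state (reserve set, answer)
def astep (st : PySem.Set Int × Int) (x : Int) : PySem.Set Int × Int :=
  if PySem.Set.contains st.1 (x - 1) then
    ((PySem.Set.remove? st.1 (x - 1)).getD st.1, st.2 + 1)
  else if PySem.Set.contains st.1 (x + 1) then
    ((PySem.Set.remove? st.1 (x + 1)).getD st.1, st.2 + 1)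
  else st

def solution (n : Int) (lost : List Int) (reserve : List Int) : Int :=
  let sLost : PySem.Set Int := PySem.Set.ofList lost
  let sReserve : PySem.Set Int := PySem.Set.ofList reserve
  let intersect : PySem.Set Int := PySem.Set.inter sLost sReserve
  let sReserve2 : PySem.Set Int := PySem.Set.diff sReserve intersect
  let sLost2 : PySem.Set Int := PySem.Set.diff sLost intersect
  let answer : Int := n - PySem.Set.len sLost2
  let st := (PySem.List.sorted sLost2 (fun x => x)).foldl astep (sReserve2, answer)
  st.2

-- ===== PORT B =====
-- B's inner 'while j < len(R) and R[j] < x - 1: j += 1'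
def skipLow (R : List Int) (x : Int) (j : Nat) : Nat :=
  if h : j < R.length then
    if R[j] < x - 1 then skipLow R x (j + 1) else j
  else j
termination_by R.length - j

-- B's loop body over state (pointer j, matched)
def bstep (R : List Int) (st : Nat × Int) (x : Int) : Nat × Int :=
  let j := skipLow R x st.1
  if h : j < R.length then
    if R[j] ≤ x + 1 then (j + 1, st.2 + 1) else (j, st.2)
  else (j, st.2)

def solution_alt (n : Int) (lost : List Int) (reserve : List Int) : Int :=
  let L := PySem.List.sorted (PySem.Set.diff (PySem.Set.ofList lost) (PySem.Set.ofList reserve)) (fun x => x)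
  let R := PySem.List.sorted (PySem.Set.diff (PySem.Set.ofList reserve) (PySem.Set.ofList lost)) (fun x => x)
  let st := L.foldl (bstep R) (0, 0)
  n - L.length + st.2

-- ===== PRECONDITION & SPEC =====
def Spec_solution (n : Int) (lost : List Int) (reserve : List Int) (out : Int) : Prop := out = solution_alt n lost reserve
instance (n : Int) (lost : List Int) (reserve : List Int) (out : Int) : Decidable (Spec_solution n lost reserve out) := by unfold Spec_solution; infer_instance

-- ===== CLAIM (what is proved, stated in full; the proofs are below) =====
def Claim_equal_solution : Prop := ∀ (n : Int) (lost : List Int) (reserve : List Int), Dom_solution n lost reserve → Spec_solution n lost reserve (solution n lost reserve)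

-- ===== LEMMAS AND PROOFS =====

-- s - (s & t) = s - t  (as lists)
theorem diff_inter_left (s t : PySem.Set Int) :
    PySem.Set.diff s (PySem.Set.inter s t) = PySem.Set.diff s t := by
  apply List.filter_congr
  intro x hx
  congr 1
  rw [Bool.eq_iff_iff, PySem.Set.contains_iff, PySem.Set.contains_iff, PySem.Set.mem_inter]
  exact ⟨fun h => h.2, fun h => ⟨hx, h⟩⟩

-- t - (s & t) = t - s  (as lists)
theorem diff_inter_right (s t : PySem.Set Int) :
    PySem.Set.diff t (PySem.Set.inter s t) = PySem.Set.diff t s := by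
  apply List.filter_congr
  intro x hx
  congr 1
  rw [Bool.eq_iff_iff, PySem.Set.contains_iff, PySem.Set.contains_iff, PySem.Set.mem_inter]
  exact ⟨fun h => h.1, fun h => ⟨h, hx⟩⟩

theorem sorted_strict (xs : List Int) (h : xs.Nodup) :
    (PySem.List.sorted xs (fun x => x)).Pairwise (· < ·) := by
  have hle := PySem.List.sorted_pairwise xs (fun x => x)
  have hnd : (PySem.List.sorted xs (fun x => x)).Nodup :=
    (PySem.List.sorted_perm xs (fun x => x) false).nodup_iff.mpr h
  exact (hle.and hnd).imp (fun ⟨h1, h2⟩ => lt_of_le_of_ne h1 h2)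

theorem skipLow_mem_drop (R : List Int) (x y : Int) (j : Nat) (hy : x - 1 ≤ y) :
    (y ∈ R.drop j ↔ y ∈ R.drop (skipLow R x j)) := by
  induction j using skipLow.induct (R := R) (x := x) with
  | case1 j h hlt ih =>
    rw [skipLow]
    simp only [h, dif_pos, hlt, if_pos]
    rw [← ih]
    rw [List.drop_eq_getElem_cons h]
    simp only [List.mem_cons]
    constructor
    · rintro (rfl | hmem)
      · omega
      · exact hmem
    · intro hmem; exact Or.inr hmem
  | case2 j h hlt =>
    rw [skipLow]; simp [h, hlt]
  | case3 j h =>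
    rw [skipLow]; simp [h]

theorem skipLow_stop (R : List Int) (x : Int) (j : Nat) :
    x - 1 ≤ R.getD (skipLow R x j) (x - 1) := by
  induction j using skipLow.induct (R := R) (x := x) with
  | case1 j hj hlt ih =>
    rw [skipLow]
    simp only [hj, dif_pos, hlt, if_pos]
    exact ih
  | case2 j hj hlt =>
    rw [skipLow, dif_pos hj, if_neg hlt, List.getD_eq_getElem _ _ hj]
    omega
  | case3 j hj =>
    rw [skipLow, dif_neg hj, List.getD_eq_default _ _ (by omega)]

-- Core loop equivalence: A's set-based greedy over L equals B's two-pointer scan,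
-- given the invariant that S and R.drop j agree on all values ≥ (head of L) - 1.
theorem loop_eq (L : List Int) : ∀ (S : PySem.Set Int) (R : List Int) (j : Nat) (acc acc2 : Int),
    L.Pairwise (· < ·) → R.Pairwise (· < ·) → S.Nodup →
    (∀ x ∈ L, x ∉ R) →
    (∀ y : Int, (∃ x ∈ L, x - 1 ≤ y) → (y ∈ S ↔ y ∈ R.drop j)) →
    (L.foldl astep (S, acc)).2 - acc = (L.foldl (bstep R) (j, acc2)).2 - acc2 := by
  induction L with
  | nil => intro S R j acc acc2 _ _ _ _ _; simp
  | cons x xs ih =>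
    intro S R j acc acc2 hL hR hS hdisj hinv
    have hxL : x ∈ x :: xs := List.mem_cons_self
    set j' := skipLow R x j with hj'
    have hdropiff : ∀ y : Int, x - 1 ≤ y → (y ∈ S ↔ y ∈ R.drop j') := by
      intro y hy
      exact (hinv y ⟨x, hxL, hy⟩).trans (skipLow_mem_drop R x y j hy)
    have hLtail : xs.Pairwise (· < ·) := hL.tail
    have hLhead : ∀ x' ∈ xs, x < x' := (List.pairwise_cons.mp hL).1
    have hdisj' : ∀ x' ∈ xs, x' ∉ R := fun x' hx' => hdisj x' (List.mem_cons_of_mem _ hx')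
    have hdropPW : (R.drop j').Pairwise (· < ·) := hR.sublist (List.drop_sublist j' R)
    simp only [List.foldl_cons]
    by_cases hj : j' < R.length
    · have hr1 : x - 1 ≤ R[j'] := by
        have h := skipLow_stop R x j
        rwa [← hj', List.getD_eq_getElem _ _ hj] at h
      have hdropcons : R.drop j' = R[j'] :: R.drop (j' + 1) := List.drop_eq_getElem_cons hj
      have htailgt : ∀ z ∈ R.drop (j' + 1), R[j'] < z := by
        have := hdropPW
        rw [hdropcons] at this
        exact (List.pairwise_cons.mp this).1
      have hrx : R[j'] ≠ x := by
        intro h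
        exact hdisj x hxL (h ▸ List.getElem_mem hj)
      by_cases hr2 : R[j'] ≤ x + 1
      · -- B matches R[j']; show A matches exactly the same element.
        have hrcases : R[j'] = x - 1 ∨ R[j'] = x + 1 := by omega
        have hbstep : bstep R (j, acc2) x = (j' + 1, acc2 + 1) := by
          simp only [bstep, ← hj']
          rw [dif_pos hj, if_pos hr2]
        have hastep : astep (S, acc) x = (PySem.Set.discard S R[j'], acc + 1) := by
          rcases hrcases with hreq | hreq
          · have hmem : x - 1 ∈ S := by
              rw [hdropiff (x - 1) (le_refl _), hdropcons, hreq]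
              exact List.mem_cons_self
            simp only [astep]
            rw [if_pos ((PySem.Set.contains_iff S (x - 1)).mpr hmem),
              PySem.Set.remove?_of_mem hmem]
            simp [hreq]
          · have hmem1 : x - 1 ∉ S := by
              rw [hdropiff (x - 1) (le_refl _), hdropcons]
              simp only [List.mem_cons]
              rintro (h | h)
              · omega
              · have := htailgt _ h; omega
            have hmem2 : x + 1 ∈ S := by
              rw [hdropiff (x + 1) (by omega), hdropcons, hreq]
              exact List.mem_cons_self
            simp only [astep]
            rw [if_neg (by simp [hmem1]),
              if_pos ((PySem.Set.contains_iff S (x + 1)).mpr hmem2),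
              PySem.Set.remove?_of_mem hmem2]
            simp [hreq]
        rw [hastep, hbstep]
        have hinv' : ∀ y : Int, (∃ x' ∈ xs, x' - 1 ≤ y) → (y ∈ PySem.Set.discard S R[j'] ↔ y ∈ R.drop (j' + 1)) := by
          rintro y ⟨x', hx', hy⟩
          have hxx' : x < x' := hLhead x' hx'
          have hyx : x - 1 ≤ y := by omega
          rw [PySem.Set.mem_discard, hdropiff y hyx, hdropcons]
          simp only [List.mem_cons]
          constructor
          · rintro ⟨(h | h), hne⟩
            · exact absurd h hne
            · exact h
          · intro h
            exact ⟨Or.inr h, fun hEq => by have := htailgt y h; omega⟩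
        have := ih (PySem.Set.discard S R[j']) R (j' + 1) (acc + 1) (acc2 + 1)
          hLtail hR (PySem.Set.nodup_discard S R[j'] hS) hdisj' hinv'
        omega
      · -- R[j'] > x + 1: neither x-1 nor x+1 available; both sides skip x.
        have hmem1 : x - 1 ∉ S := by
          rw [hdropiff (x - 1) (le_refl _), hdropcons]
          simp only [List.mem_cons]
          rintro (h | h)
          · omega
          · have := htailgt _ h; omega
        have hmem2 : x + 1 ∉ S := by
          rw [hdropiff (x + 1) (by omega), hdropcons]
          simp only [List.mem_cons]
          rintro (h | h)
          · omega
          · have := htailgt _ h; omega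
        have hastep : astep (S, acc) x = (S, acc) := by
          simp only [astep]
          rw [if_neg (by simp [hmem1]),
            if_neg (by simp [hmem2])]
        have hbstep : bstep R (j, acc2) x = (j', acc2) := by
          simp only [bstep, ← hj']
          rw [dif_pos hj, if_neg hr2]
        rw [hastep, hbstep]
        have hinv' : ∀ y : Int, (∃ x' ∈ xs, x' - 1 ≤ y) → (y ∈ S ↔ y ∈ R.drop j') := by
          rintro y ⟨x', hx', hy⟩
          have hxx' : x < x' := hLhead x' hx'
          exact hdropiff y (by omega)
        exact ih S R j' acc acc2 hLtail hR hS hdisj' hinv'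
    · -- pointer exhausted R: nothing available for x (or anything later).
      have hdropnil : R.drop j' = [] := List.drop_eq_nil_of_le (by omega)
      have hmem1 : x - 1 ∉ S := by
        rw [hdropiff (x - 1) (le_refl _), hdropnil]; simp
      have hmem2 : x + 1 ∉ S := by
        rw [hdropiff (x + 1) (by omega), hdropnil]; simp
      have hastep : astep (S, acc) x = (S, acc) := by
        simp only [astep]
        rw [if_neg (by simp [hmem1]),
          if_neg (by simp [hmem2])]
      have hbstep : bstep R (j, acc2) x = (j', acc2) := by
        simp only [bstep, ← hj']
        rw [dif_neg hj]
      rw [hastep, hbstep]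
      have hinv' : ∀ y : Int, (∃ x' ∈ xs, x' - 1 ≤ y) → (y ∈ S ↔ y ∈ R.drop j') := by
        rintro y ⟨x', hx', hy⟩
        have hxx' : x < x' := hLhead x' hx'
        exact hdropiff y (by omega)
      exact ih S R j' acc acc2 hLtail hR hS hdisj' hinv'

-- ===== VERDICT (by name: the statement is the Claim_ definition above) =====
theorem solution_spec : Claim_equal_solution := by
  intro n lost reserve _
  simp only [Spec_solution, solution, solution_alt]
  rw [diff_inter_left, diff_inter_right]
  set L0 : PySem.Set Int := PySem.Set.diff (PySem.Set.ofList lost) (PySem.Set.ofList reserve) with hL0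
  set R0 : PySem.Set Int := PySem.Set.diff (PySem.Set.ofList reserve) (PySem.Set.ofList lost) with hR0
  set Ls := PySem.List.sorted L0 (fun x => x) with hLs
  set Rs := PySem.List.sorted R0 (fun x => x) with hRs
  have hLnd : L0.Nodup := PySem.Set.nodup_diff _ _ (PySem.Set.nodup_ofList lost)
  have hRnd : R0.Nodup := PySem.Set.nodup_diff _ _ (PySem.Set.nodup_ofList reserve)
  have hLpw : Ls.Pairwise (· < ·) := sorted_strict L0 hLnd
  have hRpw : Rs.Pairwise (· < ·) := sorted_strict R0 hRnd
  have hdisj : ∀ x ∈ Ls, x ∉ Rs := by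
    intro x hx hxR
    rw [hLs, PySem.List.mem_sorted, hL0, PySem.Set.mem_diff] at hx
    rw [hRs, PySem.List.mem_sorted, hR0, PySem.Set.mem_diff] at hxR
    exact hx.2 hxR.1
  have hinv : ∀ y : Int, (∃ x ∈ Ls, x - 1 ≤ y) → (y ∈ R0 ↔ y ∈ Rs.drop 0) := by
    intro y _
    rw [List.drop_zero, hRs, PySem.List.mem_sorted]
  have hmain := loop_eq Ls R0 Rs 0 (n - PySem.Set.len L0) 0 hLpw hRpw hRnd hdisj hinv
  have hlen : PySem.Set.len L0 = (Ls.length : Int) := by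
    rw [hLs, PySem.List.length_sorted]; rfl
  omega
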